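-- pv_equiv track=rewrite | github.com/PacktPublishing/Developing-IoT-Projects-with-ESP32-2nd-edition | ch7/common/esp-rainmaker/cli/rmaker_tools/rmaker_claim/claim.py | split_device_cert
-- ===== SOURCE A (Python) =====
-- def split_device_cert(device_cert: str) -> tuple:
--     """
--     In case of matter claiming, claim_verify API returns device_cert and ca_cert in one string
--     This function splits them separate
--
--     :param device_cert: device_cert and ca_cert strings concatenated back-to-back
--     :type device_cert: str
--
--     :return: device_cert and ca_cert
--     :rtype: tuple[str, str]
--     """
--     indices = [index for index in range(len(device_cert)) if device_cert[index:].startswith("-----BEGIN CERTIFICATE-----")]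
--     if len(indices) > 1:
--         split_device_cert = device_cert[:indices[1]]
--         split_ca_cert = device_cert[indices[1]:]
--     else:
--         split_device_cert = device_cert
--         split_ca_cert = ""
--     return split_device_cert, split_ca_cert
-- ===== SOURCE B (Python) =====
-- MARKER = "-----BEGIN CERTIFICATE-----"
--
--
-- def split_device_cert(device_cert: str) -> tuple:
--     """Split concatenated device_cert and ca_cert using two str.find calls."""
--     first = device_cert.find(MARKER)
--     if first == -1:
--         return device_cert, ""
--     second = device_cert.find(MARKER, first + 1)
--     if second == -1:
--         return device_cert, ""
--     return device_cert[:second], device_cert[second:]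
-- ===== Notes on version B (the rewrite author's own statement) =====
-- stated objective: faster
-- what changed: A builds the full list of every index where the marker starts (testing startswith at each of the n positions) and indexes into it; B just issues two str.find calls (first occurrence, then first occurrence after it) and slices at the second.
import Mathlib
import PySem

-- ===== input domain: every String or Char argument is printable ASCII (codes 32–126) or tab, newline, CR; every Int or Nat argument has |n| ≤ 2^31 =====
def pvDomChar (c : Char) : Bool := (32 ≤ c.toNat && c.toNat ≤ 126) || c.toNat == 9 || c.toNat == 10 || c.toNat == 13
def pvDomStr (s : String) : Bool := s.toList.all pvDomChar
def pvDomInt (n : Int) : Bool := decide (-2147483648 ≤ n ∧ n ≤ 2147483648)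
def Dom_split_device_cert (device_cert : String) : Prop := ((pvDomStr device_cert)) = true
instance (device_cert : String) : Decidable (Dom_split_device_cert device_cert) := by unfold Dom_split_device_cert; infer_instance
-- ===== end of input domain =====

-- B replaces A's scan over every index of the string with two str.find calls (simpler: no index list is built).

def pvMarker : String := "-----BEGIN CERTIFICATE-----"

-- ===== PORT A =====
def split_device_cert (device_cert : String) : String × String :=
  let indices := (PySem.List.pyRange 0 (PySem.Str.len device_cert) 1).filter
    (fun index => PySem.Str.startswith (PySem.Str.slice device_cert (some index) none) pvMarker)
  if indices.length > 1 then
    (PySem.Str.slice device_cert none (some (PySem.List.pyGetD indices 1 0)),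
     PySem.Str.slice device_cert (some (PySem.List.pyGetD indices 1 0)) none)
  else
    (device_cert, "")

-- ===== PORT B =====
def split_device_cert_alt (device_cert : String) : String × String :=
  let first := PySem.Str.find device_cert pvMarker
  if first = -1 then
    (device_cert, "")
  else
    let second := PySem.Str.findFrom device_cert pvMarker (first + 1)
    if second = -1 then
      (device_cert, "")
    else
      (PySem.Str.slice device_cert none (some second),
       PySem.Str.slice device_cert (some second) none)

-- ===== PRECONDITION & SPEC =====
def Spec_split_device_cert (device_cert : String) (out : String × String) : Prop := out = split_device_cert_alt device_cert
instance (device_cert : String) (out : String × String) : Decidable (Spec_split_device_cert device_cert out) := by unfold Spec_split_device_cert; infer_instance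

-- ===== CLAIM (what is proved, stated in full; the proofs are below) =====
def Claim_equal_split_device_cert : Prop := ∀ (device_cert : String), Dom_split_device_cert device_cert → Spec_split_device_cert device_cert (split_device_cert device_cert)

-- ===== LEMMAS AND PROOFS =====

-- A's comprehension keeps index i iff the marker is a prefix of the tail at i.
theorem pv_pred_pos (dc : String) (i : Int) (h : 0 ≤ i)
    (hpre : pvMarker.toList <+: dc.toList.drop i.toNat) :
    PySem.Str.startswith (PySem.Str.slice dc (some i) none) pvMarker = true := by
  rw [PySem.Str.startswith_eq, PySem.Chars.startswith_iff]
  rwa [PySem.Str.slice, PySem.Chars.slice_eq_listSlice, String.toList_ofList,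
    PySem.List.slice_from _ h]

-- A range segment containing no marker position filters to nothing.
theorem pv_filter_nil (dc : String) (lo hi : Int) (hlo : 0 ≤ lo)
    (h : ∀ i : Int, lo ≤ i → i < hi → ¬ pvMarker.toList <+: dc.toList.drop i.toNat) :
    (PySem.List.pyRange lo hi).filter
      (fun index => PySem.Str.startswith (PySem.Str.slice dc (some index) none) pvMarker) = [] := by
  rw [List.filter_eq_nil_iff]
  intro x hx
  rw [PySem.List.mem_pyRange_one] at hx
  intro hq
  apply h x hx.1 hx.2
  rw [PySem.Str.startswith_eq, PySem.Chars.startswith_iff] at hq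
  rwa [PySem.Str.slice, PySem.Chars.slice_eq_listSlice, String.toList_ofList,
    PySem.List.slice_from _ (le_trans hlo hx.1)] at hq

-- a marker occurrence forces the position to lie strictly inside the string
theorem pv_lt_len (dc : String) (j : Nat) (h : pvMarker.toList <+: dc.toList.drop j) :
    j < dc.toList.length := by
  have hlen := h.length_le
  have : (0:Nat) < pvMarker.toList.length := by decide
  simp only [List.length_drop] at hlen
  omega

-- no occurrence at or after position k, phrased from ¬ infix of the dropped tail
theorem pv_no_occ_from (dc : String) (k : Nat) (h : ¬ pvMarker.toList <:+: dc.toList.drop k) :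
    ∀ i : Nat, k ≤ i → ¬ pvMarker.toList <+: dc.toList.drop i := by
  intro i hk hpre
  apply h
  rw [← PySem.Chars.isIn_iff_infix, ← PySem.Chars.exists_prefix_drop_iff_isIn]
  refine ⟨i - k, ?_⟩
  rw [List.drop_drop]
  rwa [Nat.add_sub_cancel' hk]

theorem pv_getD_one (x y : Int) (t : List Int) : PySem.List.pyGetD (x :: y :: t) 1 0 = y := by
  simp [PySem.List.pyGetD, PySem.List.pyGet?, PySem.List.pyIdx?]

theorem pv_filter_singleton_pos {p : Int → Bool} {x : Int} (h : p x = true) :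
    List.filter p [x] = [x] := by simp [h]

theorem split_device_cert_eq_alt (dc : String) :
    split_device_cert dc = split_device_cert_alt dc := by
  simp only [split_device_cert, split_device_cert_alt]
  set M := pvMarker.toList with hM
  set s := dc.toList with hs
  set f := PySem.Str.find dc pvMarker with hf
  have hfind : f = PySem.Chars.find s M := by rw [hf, PySem.Str.find_eq]
  by_cases h1 : f = -1
  · -- no occurrence at all: both take their fallback branch
    have hno : ¬ M <:+: s := by
      rw [← PySem.Chars.find_eq_neg_one_iff, ← hfind]; exact h1
    have hnil : ∀ i : Int, 0 ≤ i → i < PySem.Str.len dc → ¬ M <+: s.drop i.toNat := by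
      intro i hi _ hpre
      exact pv_no_occ_from dc 0 (by simpa using hno) i.toNat (Nat.zero_le _) hpre
    rw [pv_filter_nil dc 0 (PySem.Str.len dc) le_rfl hnil]
    rw [if_pos h1]
    rw [if_neg (by simp)]
  · -- first occurrence a := f.toNat
    have hf0 : 0 ≤ f := by
      have := PySem.Chars.neg_one_le_find s M
      rw [← hfind] at this; omega
    obtain ⟨hpa, hmin⟩ := PySem.Chars.find_spec (s := s) (sub := M) (by rw [← hfind]; exact hf0)
    rw [← hfind] at hpa hmin
    set a := f.toNat with ha
    have haN : a < s.length := pv_lt_len dc a hpa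
    have hfa : f = (a : Int) := by omega
    have hlen : PySem.Str.len dc = (s.length : Int) := by rw [PySem.Str.len_eq]
    have hsecond : PySem.Str.findFrom dc pvMarker (f + 1) =
        PySem.Chars.findFrom s M ((a + 1 : Nat) : Int) := by
      rw [PySem.Str.findFrom_eq, hfa]; push_cast; rfl
    have hk1 : a + 1 ≤ s.length := haN
    have hqa : PySem.Str.startswith (PySem.Str.slice dc (some (a : Int)) none) pvMarker = true :=
      pv_pred_pos dc (a : Int) (by omega) (by simpa using hpa)
    by_cases h2 : PySem.Str.findFrom dc pvMarker (f + 1) = -1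
    · -- single occurrence: indices = [a]; A falls to else, B to its second fallback
      have hno2 : ¬ M <:+: s.drop (a + 1) := by
        rw [← PySem.Chars.findFrom_natCast_eq_neg_one_iff s M (a+1) hk1, ← hsecond]
        exact h2
      have htail : ∀ i : Nat, a + 1 ≤ i → ¬ M <+: s.drop i := pv_no_occ_from dc (a+1) hno2
      have hsplit : PySem.List.pyRange 0 (PySem.Str.len dc) =
          PySem.List.pyRange 0 (a : Int) ++ PySem.List.pyRange (a : Int) ((a : Int) + 1)
            ++ PySem.List.pyRange ((a : Int) + 1) (PySem.Str.len dc) := by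
        rw [← PySem.List.pyRange_one_append 0 (a:Int) ((a:Int)+1) (by omega) (by omega),
            ← PySem.List.pyRange_one_append 0 ((a:Int)+1) (PySem.Str.len dc) (by omega)
              (by rw [hlen]; exact_mod_cast hk1)]
      rw [hsplit]
      simp only [List.filter_append]
      rw [pv_filter_nil dc 0 (a:Int) le_rfl (by
            intro i hi hia hpre
            exact hmin i.toNat (by omega) hpre),
          pv_filter_nil dc ((a:Int)+1) (PySem.Str.len dc) (by omega) (by
            intro i hi _ hpre
            exact htail i.toNat (by omega) hpre),
          PySem.List.pyRange_one_singleton]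
      rw [pv_filter_singleton_pos (p := fun index => PySem.Str.startswith (PySem.Str.slice dc (some index) none) pvMarker) (x := (a:Int)) hqa]
      rw [if_neg (by simp)]
      rw [if_neg h1, if_pos h2]
    · -- two occurrences: indices = a :: b :: rest, both sides slice at b
      set g := PySem.Chars.find (s.drop (a+1)) M with hg
      have hFF := PySem.Chars.findFrom_natCast s M (a+1) hk1
      have hg1 : g ≠ -1 := by
        intro hc
        apply h2
        rw [hsecond, hFF, ← hg, hc]
        simp
      have hg0 : 0 ≤ g := by
        have := PySem.Chars.neg_one_le_find (s.drop (a+1)) M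
        rw [← hg] at this; omega
      obtain ⟨hpb, hmin2⟩ := PySem.Chars.find_spec (s := s.drop (a+1)) (sub := M)
        (by rw [← hg]; exact hg0)
      rw [← hg] at hpb hmin2
      rw [List.drop_drop] at hpb
      set b := a + 1 + g.toNat with hb
      have hbN : b < s.length := pv_lt_len dc b hpb
      have hsec : PySem.Str.findFrom dc pvMarker (f + 1) = (b : Int) := by
        rw [hsecond, hFF, ← hg, if_neg hg1, hb]
        push_cast; omega
      have hmid : ∀ i : Nat, a + 1 ≤ i → i < b → ¬ M <+: s.drop i := by
        intro i hi1 hi2 hpre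
        apply hmin2 (i - (a+1)) (by omega)
        rw [List.drop_drop]
        rwa [Nat.add_sub_cancel' hi1]
      have hqb : PySem.Str.startswith (PySem.Str.slice dc (some (b : Int)) none) pvMarker = true :=
        pv_pred_pos dc (b : Int) (by omega) (by simpa using hpb)
      have hsplit : PySem.List.pyRange 0 (PySem.Str.len dc) =
          PySem.List.pyRange 0 (a : Int) ++ PySem.List.pyRange (a : Int) ((a : Int) + 1)
            ++ (PySem.List.pyRange ((a : Int) + 1) (b : Int)
              ++ PySem.List.pyRange (b : Int) ((b : Int) + 1)
              ++ PySem.List.pyRange ((b : Int) + 1) (PySem.Str.len dc)) := by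
        rw [← PySem.List.pyRange_one_append ((a:Int)+1) (b:Int) ((b:Int)+1)
              (by omega) (by omega),
            ← PySem.List.pyRange_one_append ((a:Int)+1) ((b:Int)+1) (PySem.Str.len dc)
              (by omega) (by rw [hlen]; exact_mod_cast hbN),
            ← PySem.List.pyRange_one_append 0 (a:Int) ((a:Int)+1) (by omega) (by omega),
            ← PySem.List.pyRange_one_append 0 ((a:Int)+1) (PySem.Str.len dc) (by omega)
              (by rw [hlen]; exact_mod_cast hk1)]
      rw [hsplit]
      simp only [List.filter_append]
      rw [pv_filter_nil dc 0 (a:Int) le_rfl (by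
            intro i hi hia hpre
            exact hmin i.toNat (by omega) hpre),
          pv_filter_nil dc ((a:Int)+1) (b:Int) (by omega) (by
            intro i hi hib hpre
            exact hmid i.toNat (by omega) (by omega) hpre),
          PySem.List.pyRange_one_singleton, PySem.List.pyRange_one_singleton]
      rw [pv_filter_singleton_pos (p := fun index => PySem.Str.startswith (PySem.Str.slice dc (some index) none) pvMarker) (x := (a:Int)) hqa,
          pv_filter_singleton_pos (p := fun index => PySem.Str.startswith (PySem.Str.slice dc (some index) none) pvMarker) (x := (b:Int)) hqb]
      simp only [List.nil_append, List.cons_append, List.length_cons]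
      rw [if_pos (by omega)]
      rw [pv_getD_one]
      rw [if_neg h1, hsec, if_neg (by omega)]

-- ===== VERDICT (by name: the statement is the Claim_ definition above) =====
theorem split_device_cert_spec : Claim_equal_split_device_cert := by
  intro dc _
  unfold Spec_split_device_cert
  exact split_device_cert_eq_alt dc
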